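-- pv_equiv track=rewrite | github.com/pharth/Human-info-agent | tools/web_search.py | _parse_jina_response
-- ===== SOURCE A (Python) =====
-- from typing import List, Dict
--
-- def _parse_jina_response(content: str, query: str) -> List[Dict]:
--     """Parse Jina API response into structured format"""
--     # Simple parsing - you might need to adjust based on actual Jina response format
--     lines = content.split('\n')
--     results = []
--
--     current_result = {}
--     for line in lines:
--         if line.strip():
--             if '**' in line:  # Title
--                 if current_result:
--                     results.append(current_result)
--                     current_result = {}
--                 current_result['title'] = line.strip('*').strip()
--             elif line.startswith('http'):  # URL
--                 current_result['url'] = line.strip()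
--             else:  # Content
--                 if 'content' not in current_result:
--                     current_result['content'] = ""
--                 current_result['content'] += line + " "
--
--     if current_result:
--         results.append(current_result)
--
--     return results
-- ===== SOURCE B (Python) =====
-- from typing import List, Dict
--
-- def _segment_fields(seg: List[str]) -> Dict:
--     """Collect the fields of one result from its lines."""
--     d = {}
--     for line in seg:
--         if '**' in line:
--             d['title'] = line.strip('*').strip()
--         elif line.startswith('http'):
--             d['url'] = line.strip()
--         else:
--             d['content'] = d.get('content', '') + line + ' '
--     return d
--
-- def _parse_jina_response(content: str, query: str) -> List[Dict]:
--     """Parse Jina API response: group the non-blank lines into segments opened at each '**' title line, then collect each segment's fields."""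
--     lines = [l for l in content.split('\n') if l.strip()]
--     segments = []
--     for line in lines:
--         if not segments or '**' in line:
--             segments.append([])
--         segments[-1].append(line)
--     return [_segment_fields(seg) for seg in segments]
-- ===== Notes on version B (the rewrite author's own statement) =====
-- stated objective: alternative
-- what changed: A's single stateful loop (one dict mutated across lines, flushed into the result list whenever a title line arrives and it is non-empty) is re-decomposed into two passes: first group the non-blank lines into segments, opening a new segment at each '**' title line, then map each segment independently to its field dict with a small helper.
import Mathlib
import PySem

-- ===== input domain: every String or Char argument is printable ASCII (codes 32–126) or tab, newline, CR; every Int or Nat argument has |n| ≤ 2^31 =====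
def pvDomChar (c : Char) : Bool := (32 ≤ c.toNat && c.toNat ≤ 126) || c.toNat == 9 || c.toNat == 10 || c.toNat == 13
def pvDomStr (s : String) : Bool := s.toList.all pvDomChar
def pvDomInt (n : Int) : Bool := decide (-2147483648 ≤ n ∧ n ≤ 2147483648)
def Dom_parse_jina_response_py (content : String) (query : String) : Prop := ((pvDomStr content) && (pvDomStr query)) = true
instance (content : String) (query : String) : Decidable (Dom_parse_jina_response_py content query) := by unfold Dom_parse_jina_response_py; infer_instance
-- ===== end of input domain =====

-- B re-decomposes A's single stateful loop (flush-on-title) into two passes: group the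
-- non-blank lines into segments at '**' title lines, then map each segment to its field
-- dict; same observable results (objective: alternative decomposition).
-- Both ports represent Python dicts as PySem.Dict String (List Char) (lines as List Char
-- via PySem.Chars, exact on the ASCII domain) and render to association lists at the end.

-- shared line predicates (each is the literal condition from the Python sources)
def pvIsTitle (l : List Char) : Bool := PySem.Chars.isIn ['*', '*'] l          -- '**' in line
def pvIsHttp (l : List Char) : Bool := PySem.Chars.startswith l ['h','t','t','p']  -- line.startswith('http')
def pvNonBlank (l : List Char) : Bool := !(PySem.Chars.strip l).isEmpty        -- bool(line.strip())
-- rendering of the dict to the required association-list type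
def pvOut (d : PySem.Dict String (List Char)) : List (String × String) :=
  d.items.map (fun p => (p.1, String.mk p.2))

-- ===== PORT A =====
-- the body of A's for-loop, on state (results, current_result)
def pvStepA (st : List (PySem.Dict String (List Char)) × PySem.Dict String (List Char))
    (line : List Char) :
    List (PySem.Dict String (List Char)) × PySem.Dict String (List Char) :=
  if pvNonBlank line then
    if pvIsTitle line then
      let st2 := if st.2.size ≠ 0 then (st.1 ++ [st.2], PySem.Dict.empty) else st
      (st2.1, st2.2.insert "title" (PySem.Chars.strip (PySem.Chars.stripChars line ['*'])))
    else if pvIsHttp line then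
      (st.1, st.2.insert "url" (PySem.Chars.strip line))
    else
      let cur := if st.2.contains "content" then st.2 else st.2.insert "content" []
      (st.1, cur.insert "content" (cur.getD "content" [] ++ (line ++ [' '])))
  else st

def parse_jina_response_py (content : String) (query : String) : List (List (String × String)) :=
  let lines := PySem.Chars.splitOn content.toList ['\n']
  let st := lines.foldl pvStepA ([], PySem.Dict.empty)
  let results := if st.2.size ≠ 0 then st.1 ++ [st.2] else st.1
  results.map pvOut

-- ===== PORT B =====
-- pass 1 loop body: open a new segment when none is open or the line is a title line
def pvSeg (segs : List (List (List Char))) (line : List Char) : List (List (List Char)) :=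
  let segs := if segs.isEmpty || pvIsTitle line then segs ++ [[]] else segs
  segs.dropLast ++ [segs.getLastD [] ++ [line]]

-- pass 2 helper _segment_fields: collect the fields of one result from its lines
def pvFieldStep (d : PySem.Dict String (List Char)) (line : List Char) :
    PySem.Dict String (List Char) :=
  if pvIsTitle line then
    d.insert "title" (PySem.Chars.strip (PySem.Chars.stripChars line ['*']))
  else if pvIsHttp line then
    d.insert "url" (PySem.Chars.strip line)
  else
    d.insert "content" (d.getD "content" [] ++ (line ++ [' ']))

def pvSegmentFields (seg : List (List Char)) : PySem.Dict String (List Char) :=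
  seg.foldl pvFieldStep PySem.Dict.empty

def parse_jina_response_py_alt (content : String) (query : String) : List (List (String × String)) :=
  let lines := (PySem.Chars.splitOn content.toList ['\n']).filter pvNonBlank
  let segs := lines.foldl pvSeg []
  (segs.map pvSegmentFields).map pvOut

-- ===== PRECONDITION & SPEC =====
def Spec_parse_jina_response_py (content : String) (query : String) (out : List (List (String × String))) : Prop := out = parse_jina_response_py_alt content query
instance (content : String) (query : String) (out : List (List (String × String))) : Decidable (Spec_parse_jina_response_py content query out) := by unfold Spec_parse_jina_response_py; infer_instance

-- ===== CLAIM (what is proved, stated in full; the proofs are below) =====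
def Claim_equal_parse_jina_response_py : Prop := ∀ (content : String) (query : String), Dom_parse_jina_response_py content query → Spec_parse_jina_response_py content query (parse_jina_response_py content query)

-- ===== LEMMAS AND PROOFS =====

-- A's per-line dict update, with the flush removed (what A does to current_result)
def pvUpd (cur : PySem.Dict String (List Char)) (line : List Char) : PySem.Dict String (List Char) :=
  if pvIsTitle line then
    cur.insert "title" (PySem.Chars.strip (PySem.Chars.stripChars line ['*']))
  else if pvIsHttp line then
    cur.insert "url" (PySem.Chars.strip line)
  else
    let cur2 := if cur.contains "content" then cur else cur.insert "content" []
    cur2.insert "content" (cur2.getD "content" [] ++ (line ++ [' ']))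

def pvDictSeg (seg : List (List Char)) : PySem.Dict String (List Char) :=
  seg.foldl pvUpd PySem.Dict.empty

def pvStateOf (segs : List (List (List Char))) :
    List (PySem.Dict String (List Char)) × PySem.Dict String (List Char) :=
  ((segs.dropLast).map pvDictSeg, pvDictSeg (segs.getLastD []))

def pvGood (segs : List (List (List Char))) : Prop := ∀ seg ∈ segs, seg ≠ []

theorem pvSzpos {ν : Type} (d : PySem.Dict String ν) (k : String) (v : ν) : 0 < (d.insert k v).size := by
  rw [PySem.Dict.size_insert]
  split
  next h =>
    have h1 : d.keys ≠ [] := List.ne_nil_of_mem ((PySem.Dict.contains_iff_mem_keys d k).mp h)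
    have h2 : 0 < d.keys.length := List.length_pos_of_ne_nil h1
    simpa [PySem.Dict.keys, PySem.Dict.size] using h2
  next => omega

theorem pvUpd_size_pos (cur : PySem.Dict String (List Char)) (line : List Char) :
    0 < (pvUpd cur line).size := by
  unfold pvUpd
  split_ifs <;> exact pvSzpos _ _ _

theorem pvFold_size_pos (t : List (List Char)) : ∀ d, 0 < d.size → 0 < (t.foldl pvUpd d).size := by
  induction t with
  | nil => intro d hd; simpa using hd
  | cons l t ih => intro d _; exact ih (pvUpd d l) (pvUpd_size_pos d l)

theorem pvDictSeg_size_pos (seg : List (List Char)) (h : seg ≠ []) :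
    0 < (pvDictSeg seg).size := by
  cases seg with
  | nil => exact absurd rfl h
  | cons a t => simpa [pvDictSeg] using pvFold_size_pos t (pvUpd PySem.Dict.empty a) (pvUpd_size_pos _ _)

-- A's content branch collapses to B's single get-default insert
theorem pvUpd_eq_fieldStep (cur : PySem.Dict String (List Char)) (line : List Char) :
    pvUpd cur line = pvFieldStep cur line := by
  unfold pvUpd pvFieldStep
  by_cases ht : pvIsTitle line = true
  · simp [ht]
  · by_cases hh : pvIsHttp line = true
    · simp [ht, hh]
    · simp only [ht, hh, Bool.false_eq_true, if_false]
      by_cases hc : cur.contains "content" = true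
      · simp [hc]
      · simp only [hc, Bool.false_eq_true, if_false]
        rw [PySem.Dict.getD_insert_self, PySem.Dict.insert_insert_self]
        have h0 : cur.get? "content" = none := by
          rw [PySem.Dict.get?_eq_none_iff_contains]; simpa using hc
        simp [PySem.Dict.getD_eq_get?_getD, h0]

theorem pvDictSeg_eq_fields (seg : List (List Char)) : pvDictSeg seg = pvSegmentFields seg := by
  unfold pvDictSeg pvSegmentFields
  congr 1
  funext d l
  exact pvUpd_eq_fieldStep d l

theorem pvLastD_mem (segs : List (List (List Char))) (h : segs ≠ []) : segs.getLastD [] ∈ segs := by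
  rw [List.getLastD_eq_getLast?, List.getLast?_eq_some_getLast h]
  exact List.getLast_mem h

theorem pvMapLast (f : List (List Char) → PySem.Dict String (List Char))
    (segs : List (List (List Char))) (h : segs ≠ []) :
    (segs.dropLast).map f ++ [f (segs.getLastD [])] = segs.map f := by
  conv_rhs => rw [← List.dropLast_append_getLast h]
  rw [List.map_append, List.getLastD_eq_getLast?, List.getLast?_eq_some_getLast h]
  simp

theorem pvStepA_skip (st : List (PySem.Dict String (List Char)) × PySem.Dict String (List Char))
    (l : List Char) (h : pvNonBlank l = false) : pvStepA st l = st := by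
  simp [pvStepA, h]

theorem pvStepA_nonTitle (st : List (PySem.Dict String (List Char)) × PySem.Dict String (List Char))
    (l : List Char) (hnb : pvNonBlank l = true) (hti : pvIsTitle l = false) :
    pvStepA st l = (st.1, pvUpd st.2 l) := by
  simp only [pvStepA, pvUpd, hnb, hti, Bool.false_eq_true, if_false, ite_true]
  by_cases hh : pvIsHttp l = true <;> simp [hh]

theorem pvDictSeg_snoc (seg : List (List Char)) (l : List Char) :
    pvDictSeg (seg ++ [l]) = pvUpd (pvDictSeg seg) l := by
  simp [pvDictSeg, List.foldl_append]

theorem pvStep_eq (segs : List (List (List Char))) (hg : pvGood segs) (l : List Char)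
    (hnb : pvNonBlank l = true) :
    pvStepA (pvStateOf segs) l = pvStateOf (pvSeg segs l) ∧ pvGood (pvSeg segs l) := by
  by_cases he : segs = []
  · subst he
    have hseg : pvSeg [] l = [[l]] := by simp [pvSeg]
    rw [hseg]
    constructor
    · by_cases hti : pvIsTitle l = true
      · simp [pvStateOf, pvStepA, pvDictSeg, pvUpd, hnb, hti, PySem.Dict.size_empty]
      · rw [pvStepA_nonTitle _ _ hnb (by simpa using hti)]
        simp [pvStateOf, pvDictSeg]
    · intro seg hs
      simp only [List.mem_singleton] at hs
      subst hs
      simp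
  · have hlast_mem := pvLastD_mem segs he
    have hlne := hg _ hlast_mem
    have hsz : (pvDictSeg (segs.getLastD [])).size ≠ 0 :=
      Nat.pos_iff_ne_zero.mp (pvDictSeg_size_pos _ hlne)
    by_cases hti : pvIsTitle l = true
    · have hseg : pvSeg segs l = segs ++ [[l]] := by
        simp [pvSeg, hti, List.dropLast_concat]
      rw [hseg]
      constructor
      · have : pvStepA (pvStateOf segs) l =
            ((pvStateOf segs).1 ++ [(pvStateOf segs).2],
              PySem.Dict.empty.insert "title" (PySem.Chars.strip (PySem.Chars.stripChars l ['*']))) := by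
          simp only [pvStepA, hnb, hti, ite_true, pvStateOf]
          have hsz' : ¬(pvDictSeg (segs.getLast?.getD [])).size = 0 := by
            rw [← List.getLastD_eq_getLast?]; exact hsz
          simp [hsz']
        rw [this]
        have h2 : (pvStateOf segs).1 ++ [(pvStateOf segs).2] = segs.map pvDictSeg :=
          pvMapLast pvDictSeg segs he
        rw [h2]
        simp only [pvStateOf, List.dropLast_concat]
        refine Prod.ext_iff.mpr ⟨?_, ?_⟩
        · rfl
        · simp [pvDictSeg, pvUpd, hti]
      · intro seg hs
        rcases List.mem_append.mp hs with hs | hs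
        · exact hg _ hs
        · simp only [List.mem_singleton] at hs
          subst hs
          simp
    · have hti' : pvIsTitle l = false := by simpa using hti
      have hne2 : ¬(segs.isEmpty || pvIsTitle l) = true := by
        simp [List.isEmpty_iff, he, hti']
      have hseg : pvSeg segs l = segs.dropLast ++ [segs.getLastD [] ++ [l]] := by
        simp only [pvSeg, hne2, Bool.not_eq_true, if_neg, ite_false]
      rw [hseg, pvStepA_nonTitle _ _ hnb hti']
      constructor
      · simp only [pvStateOf, List.dropLast_concat]
        refine Prod.ext_iff.mpr ⟨?_, ?_⟩
        · simp
        · rw [List.getLastD_concat]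
          exact (pvDictSeg_snoc _ _).symm
      · intro seg hs
        rcases List.mem_append.mp hs with hs | hs
        · exact hg _ (List.dropLast_subset _ hs)
        · simp only [List.mem_singleton] at hs
          subst hs
          simp [hlne]

theorem pvMain (L : List (List Char)) (hL : ∀ l ∈ L, pvNonBlank l = true) :
    ∀ segs, pvGood segs →
      L.foldl pvStepA (pvStateOf segs) = pvStateOf (L.foldl pvSeg segs) ∧
      pvGood (L.foldl pvSeg segs) := by
  induction L with
  | nil => intro segs hg; exact ⟨rfl, hg⟩
  | cons l L ih =>
    intro segs hg
    have hnb : pvNonBlank l = true := hL l (by simp)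
    have hL' : ∀ x ∈ L, pvNonBlank x = true := fun x hx => hL x (by simp [hx])
    obtain ⟨h1, h2⟩ := pvStep_eq segs hg l hnb
    rw [List.foldl_cons, List.foldl_cons, h1]
    exact (ih hL' _ h2)

theorem pvFoldA_filter (lines : List (List Char)) :
    ∀ st, lines.foldl pvStepA st = (lines.filter pvNonBlank).foldl pvStepA st := by
  induction lines with
  | nil => intro st; rfl
  | cons l ls ih =>
    intro st
    by_cases h : pvNonBlank l = true
    · simp only [List.filter_cons, h, ite_true, List.foldl_cons, ih]
    · have h' : pvNonBlank l = false := by simpa using h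
      simp only [List.filter_cons, h', Bool.false_eq_true, ite_false, List.foldl_cons,
        pvStepA_skip st l h', ih]

-- ===== VERDICT (by name: the statement is the Claim_ definition above) =====
theorem parse_jina_response_py_spec : Claim_equal_parse_jina_response_py := by
  intro content query _
  unfold Spec_parse_jina_response_py parse_jina_response_py parse_jina_response_py_alt
  simp only []
  rw [pvFoldA_filter]
  have hLnb : ∀ l ∈ (PySem.Chars.splitOn content.toList ['\n']).filter pvNonBlank,
      pvNonBlank l = true := fun l hl => List.of_mem_filter hl
  obtain ⟨h1, h2⟩ := pvMain _ hLnb [] (by intro seg hs; simp at hs)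
  have hinit : (([] : List (PySem.Dict String (List Char))), PySem.Dict.empty) = pvStateOf [] := rfl
  rw [hinit, h1]
  set S := ((PySem.Chars.splitOn content.toList ['\n']).filter pvNonBlank).foldl pvSeg [] with hS
  by_cases hSe : S = []
  · rw [hSe]
    simp [pvStateOf, pvDictSeg, PySem.Dict.size_empty]
  · have hmem := pvLastD_mem S hSe
    have hlne := h2 _ hmem
    have hsz : (pvDictSeg (S.getLastD [])).size ≠ 0 :=
      Nat.pos_iff_ne_zero.mp (pvDictSeg_size_pos _ hlne)
    simp only [pvStateOf, hsz, ne_eq, not_false_eq_true, ite_true]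
    rw [pvMapLast pvDictSeg S hSe]
    rw [List.map_map, List.map_map]
    apply List.map_congr_left
    intro seg _
    simp [Function.comp_apply, pvDictSeg_eq_fields seg]
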